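-- pv_equiv track=rewrite | github.com/liaozhenzhong/snippet_py | test_smallest_rotation_highest_score.py | bestRotation2
-- ===== SOURCE A (Python) =====
-- def bestRotation2(A):
--     L = len(A)
--     A = A * 2
--     best_points = 0
--     best_k = 0
--     for k in range(L):
--         point = 0
--         for i in range(L):
--             if A[k + i] <= i:
--                 point += 1
--         if point > best_points:
--             best_points = point
--             best_k = k
--     return best_k
-- ===== SOURCE B (Python) =====
-- def bestRotation2(A):
--     # O(n) via a difference array of rotation intervals, then one prefix-sum argmax pass.
--     L = len(A)
--     if L == 0:
--         return 0
--     diff = [0] * (L + 1)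
--     for j, v in enumerate(A):
--         if v <= 0:
--             diff[0] += 1
--         elif v < L:
--             low = (j + 1) % L
--             high = j - v if v <= j else j - v + L
--             if low <= high:
--                 diff[low] += 1
--                 diff[high + 1] -= 1
--             else:
--                 diff[0] += 1
--                 diff[high + 1] -= 1
--                 diff[low] += 1
--     best_k = 0
--     best_points = 0
--     score = 0
--     for k in range(L):
--         score += diff[k]
--         if score > best_points:
--             best_points = score
--             best_k = k
--     return best_k
-- ===== Notes on version B (the rewrite author's own statement) =====
-- stated objective: faster
-- what changed: Replaced the O(n^2) nested loops (score every rotation by scanning the doubled list) by an O(n) difference array: each element contributes +1 over the circular interval of rotations where it scores, then one prefix-sum pass picks the first rotation with the maximal score.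
import Mathlib
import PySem

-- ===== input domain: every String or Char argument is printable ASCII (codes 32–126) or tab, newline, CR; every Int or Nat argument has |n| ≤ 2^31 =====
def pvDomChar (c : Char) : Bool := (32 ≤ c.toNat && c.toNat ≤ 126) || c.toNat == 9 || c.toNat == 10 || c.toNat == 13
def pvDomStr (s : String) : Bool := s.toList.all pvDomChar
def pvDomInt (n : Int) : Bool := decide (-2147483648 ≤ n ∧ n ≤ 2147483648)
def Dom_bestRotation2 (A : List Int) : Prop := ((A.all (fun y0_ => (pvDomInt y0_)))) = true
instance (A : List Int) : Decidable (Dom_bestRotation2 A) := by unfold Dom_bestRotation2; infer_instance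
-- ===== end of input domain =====

-- B replaces A's O(n^2) rotate-and-count with an O(n) difference array over the circular
-- rotation intervals where each element scores, plus one prefix-sum argmax pass (measured faster).
-- ===== PORT A =====
-- Literal transliteration of A: doubled list, quadratic nested loops, strict argmax.
def bestRotation2 (A : List Int) : Int :=
  let L : Int := A.length
  let A2 := PySem.List.pyRepeat A 2
  let r := (PySem.List.pyRange 0 L 1).foldl (fun (s : Int × Int) k =>
    let point := (PySem.List.pyRange 0 L 1).foldl
      (fun (p : Int) i => if PySem.List.pyGetD A2 (k + i) 0 ≤ i then p + 1 else p) 0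
    if point > s.1 then (point, k) else s) (0, 0)
  r.2

-- ===== PORT B =====
-- Transliteration of B: difference array over rotation intervals, one prefix-sum argmax pass.
def pvStepB (L : Nat) (d : List Int) (jv : Int × Int) : List Int :=
  let j := jv.1
  let v := jv.2
  if v ≤ 0 then PySem.List.pySetD d 0 (PySem.List.pyGetD d 0 0 + 1)
  else if v < (L : Int) then
    let low : Int := PySem.Int.mod (j + 1) L
    let high : Int := if v ≤ j then j - v else j - v + L
    if low ≤ high then
      let d1 := PySem.List.pySetD d low (PySem.List.pyGetD d low 0 + 1)
      PySem.List.pySetD d1 (high + 1) (PySem.List.pyGetD d1 (high + 1) 0 - 1)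
    else
      let d1 := PySem.List.pySetD d 0 (PySem.List.pyGetD d 0 0 + 1)
      let d2 := PySem.List.pySetD d1 (high + 1) (PySem.List.pyGetD d1 (high + 1) 0 - 1)
      PySem.List.pySetD d2 low (PySem.List.pyGetD d2 low 0 + 1)
  else d

def bestRotation2_alt (A : List Int) : Int :=
  let L : Nat := A.length
  if L = 0 then 0
  else
    let diff := (PySem.List.enumerate A).foldl (pvStepB L) (List.replicate (L + 1) 0)
    let r := (PySem.List.pyRange 0 L 1).foldl (fun (s : Int × Int × Int) k =>
      let score := s.2.2 + PySem.List.pyGetD diff k 0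
      if score > s.2.1 then (k, score, score) else (s.1, s.2.1, score)) (0, 0, 0)
    r.1

-- ===== PRECONDITION & SPEC =====
def Spec_bestRotation2 (A : List Int) (out : Int) : Prop := out = bestRotation2_alt A
instance (A : List Int) (out : Int) : Decidable (Spec_bestRotation2 A out) := by unfold Spec_bestRotation2; infer_instance

-- ===== CLAIM (what is proved, stated in full; the proofs are below) =====
def Claim_equal_bestRotation2 : Prop := ∀ (A : List Int), Dom_bestRotation2 A → Spec_bestRotation2 A (bestRotation2 A)

-- ===== LEMMAS AND PROOFS =====

-- prefix sum of the first k entries of the difference array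
def pvPref (d : List Int) : Nat → Int
  | 0 => 0
  | (k+1) => pvPref d k + d.getD k 0

-- per-element contribution of B's update to a prefix sum of length k+1
def pvContrib (L : Nat) (j v : Int) (k : Nat) : Int :=
  if v ≤ 0 then 1
  else if v < (L : Int) then
    (if PySem.Int.mod (j + 1) L < (k : Int) + 1 then 1 else 0) +
    (if (if v ≤ j then j - v else j - v + L) + 1 < (k : Int) + 1 then (-1 : Int) else 0) +
    (if PySem.Int.mod (j + 1) L ≤ (if v ≤ j then j - v else j - v + L) then 0 else 1)
  else 0

-- the score of rotation k, expressed over the original list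
def pvVal (A : List Int) (k : Nat) : Int :=
  ((List.range A.length).map (fun j =>
    if A.getD j 0 ≤ (if k ≤ j then ((j : Int) - k) else ((j : Int) + A.length - k)) then (1 : Int) else 0)).sum

lemma pv_pyGetD_toNat (d : List Int) (i : Int) (h : 0 ≤ i) (x : Int) :
    PySem.List.pyGetD d i x = d.getD i.toNat x := by
  rw [show i = ((i.toNat : Nat) : Int) from (Int.toNat_of_nonneg h).symm,
      PySem.List.pyGetD_natCast, Int.toNat_natCast]

lemma pvGetD_set (d : List Int) (m k : Nat) (x y : Int) :
    (d.set m x).getD k y = if m = k ∧ m < d.length then x else d.getD k y := by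
  simp only [List.getD, List.getElem?_set]
  split_ifs with h1 h2 h3 <;> simp_all <;> omega

lemma pvPref_set (d : List Int) (m : Nat) (x : Int) :
    ∀ k, pvPref (d.set m x) k = pvPref d k + (if m < k ∧ m < d.length then x - d.getD m 0 else 0)
  | 0 => by simp [pvPref]
  | (k+1) => by
      rw [pvPref, pvPref, pvPref_set d m x k, pvGetD_set]
      split_ifs <;> simp_all <;> omega

lemma pvPref_replicate (n : Nat) : ∀ k, pvPref (List.replicate n (0 : Int)) k = 0
  | 0 => rfl
  | (k+1) => by
      rw [pvPref, pvPref_replicate n k]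
      simp [List.getD, List.getElem?_replicate]
      split_ifs <;> simp

lemma pvStepB_length (L : Nat) (d : List Int) (jv : Int × Int) :
    (pvStepB L d jv).length = d.length := by
  unfold pvStepB
  dsimp only
  split_ifs <;> simp [PySem.List.length_pySetD]

lemma pvStepB_pref (L : Nat) (d : List Int) (j v : Int) (k : Nat)
    (hj : 0 ≤ j) (hjL : j < (L : Int)) (hd : d.length = L + 1) (hk : k < L) :
    pvPref (pvStepB L d (j, v)) (k+1) = pvPref d (k+1) + pvContrib L j v k := by
  have hL : 0 < L := by omega
  have hLi : (0 : Int) < L := by exact_mod_cast hL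
  unfold pvStepB pvContrib
  dsimp only
  by_cases h0 : v ≤ 0
  · rw [if_pos h0, if_pos h0,
        PySem.List.pySetD_of_nonneg _ _ (le_refl (0 : Int)),
        pv_pyGetD_toNat d 0 (le_refl (0 : Int)), pvPref_set,
        show ((0 : Int)).toNat = 0 from rfl]
    split_ifs <;> omega
  · rw [if_neg h0, if_neg h0]
    by_cases hvL : v < (L : Int)
    · rw [if_pos hvL, if_pos hvL]
      have hlow0 : 0 ≤ PySem.Int.mod (j + 1) L := PySem.Int.mod_nonneg _ hLi
      have hlowL : PySem.Int.mod (j + 1) L < (L : Int) := PySem.Int.mod_lt _ hLi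
      set low := PySem.Int.mod (j + 1) L with hlowdef
      set high := (if v ≤ j then j - v else j - v + (L : Int)) with hhighdef
      have hhigh0 : 0 ≤ high := by rw [hhighdef]; split_ifs <;> omega
      have hhighL : high < (L : Int) := by rw [hhighdef]; split_ifs <;> omega
      have hcl : ((low.toNat : Nat) : Int) = low := Int.toNat_of_nonneg hlow0
      have hch : (((high + 1).toNat : Nat) : Int) = high + 1 := Int.toNat_of_nonneg (by omega)
      by_cases hlh : low ≤ high
      · rw [if_pos hlh, if_pos hlh,
            PySem.List.pySetD_of_nonneg _ _ hlow0,
            pv_pyGetD_toNat d low hlow0,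
            PySem.List.pySetD_of_nonneg _ _ (by omega : (0:Int) ≤ high + 1),
            pv_pyGetD_toNat _ (high + 1) (by omega),
            pvPref_set, pvPref_set, pvGetD_set]
        simp only [List.length_set]
        split_ifs <;> omega
      · rw [if_neg hlh, if_neg hlh,
            PySem.List.pySetD_of_nonneg _ _ (le_refl (0 : Int)),
            pv_pyGetD_toNat d 0 (le_refl (0 : Int)),
            PySem.List.pySetD_of_nonneg _ _ (by omega : (0:Int) ≤ high + 1),
            pv_pyGetD_toNat _ (high + 1) (by omega),
            PySem.List.pySetD_of_nonneg _ _ hlow0,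
            pv_pyGetD_toNat _ low hlow0,
            pvPref_set, pvPref_set, pvPref_set,
            show ((0 : Int)).toNat = 0 from rfl]
        simp only [List.length_set]
        split_ifs <;> omega
    · rw [if_neg hvL, if_neg hvL]
      simp

lemma pvFold_pref (L : Nat) (l : List (Int × Int)) (k : Nat) (hk : k < L) :
    ∀ (d : List Int), d.length = L + 1 → (∀ p ∈ l, 0 ≤ p.1 ∧ p.1 < (L : Int)) →
    pvPref (l.foldl (pvStepB L) d) (k+1)
      = pvPref d (k+1) + (l.map (fun p => pvContrib L p.1 p.2 k)).sum := by
  induction l with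
  | nil => intro d _ _; simp
  | cons p t ih =>
      intro d hd hmem
      have hp := hmem p (List.mem_cons_self)
      rw [List.foldl_cons, List.map_cons, List.sum_cons,
          ih (pvStepB L d p) (by rw [pvStepB_length, hd]) (fun q hq => hmem q (List.mem_cons_of_mem _ hq))]
      have := pvStepB_pref L d p.1 p.2 k hp.1 hp.2 hd hk
      rw [show (p.1, p.2) = p from rfl] at this
      rw [this]
      ring

lemma pvContrib_eq (L j k : Nat) (v : Int) (hj : j < L) (hk : k < L) :
    pvContrib L (j : Int) v k
      = if v ≤ (if k ≤ j then ((j : Int) - k) else ((j : Int) + L - k)) then 1 else 0 := by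
  have hL : 0 < L := by omega
  have hLi : (0 : Int) < L := by exact_mod_cast hL
  have hmod : PySem.Int.mod ((j : Int) + 1) L = if j + 1 = L then 0 else (j : Int) + 1 := by
    rw [PySem.Int.mod_eq_emod_of_pos hLi]
    by_cases h : j + 1 = L
    · rw [if_pos h, show ((j : Int) + 1) = (L : Int) from by exact_mod_cast h]
      exact Int.emod_self
    · rw [if_neg h]
      exact Int.emod_eq_of_lt (by omega) (by exact_mod_cast (by omega : j + 1 < L))
  unfold pvContrib
  rw [hmod]
  split_ifs <;> omega

lemma pvPref_final (A : List Int) (k : Nat) (hk : k < A.length) :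
    pvPref ((PySem.List.enumerate A).foldl (pvStepB A.length) (List.replicate (A.length + 1) 0)) (k+1)
      = pvVal A k := by
  rw [pvFold_pref A.length _ k hk _ (by simp) ?hmem]
  case hmem =>
    intro p hp
    rw [PySem.List.mem_enumerate_iff] at hp
    obtain ⟨t, ht, rfl⟩ := hp
    constructor <;> simp <;> omega
  rw [pvPref_replicate, zero_add]
  rw [PySem.List.enumerate_eq_map_pyRange (d := 0), List.map_map,
      PySem.List.pyRange_one, List.map_map]
  unfold pvVal
  apply congrArg List.sum
  simp only [Int.sub_zero]
  apply List.map_congr_left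
  intro t ht
  rw [List.mem_range] at ht
  simp only [Function.comp, zero_add, PySem.List.pyGetD_natCast]
  rw [show A.getD t 0 = A.getD t 0 from rfl]
  exact pvContrib_eq A.length t k (A.getD t 0) ht hk

lemma pvRepeat_two (A : List Int) : PySem.List.pyRepeat A 2 = A ++ A := by
  simp [PySem.List.pyRepeat, List.replicate]

lemma pvA_count (A : List Int) (k : Nat) (hk : k < A.length) :
    ((List.range A.length).map (fun i =>
        if (A ++ A).getD (k + i) 0 ≤ (i : Int) then (1 : Int) else 0)).sum = pvVal A k := by
  have hgl : ∀ n, n < A.length → (A ++ A).getD n 0 = A.getD n 0 := by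
    intro n hn
    simp [List.getD, List.getElem?_append, hn]
  have hgr : ∀ n, A.length ≤ n → n < 2 * A.length → (A ++ A).getD n 0 = A.getD (n - A.length) 0 := by
    intro n h1 h2
    simp [List.getD, List.getElem?_append_right h1]
  have hsplitL : List.range A.length
      = List.range (A.length - k) ++ (List.range k).map (fun t => (A.length - k) + t) := by
    rw [← List.range_add]; congr 1; omega
  have hsplitR : List.range A.length
      = List.range k ++ (List.range (A.length - k)).map (fun u => k + u) := by
    rw [← List.range_add]; congr 1; omega
  unfold pvVal
  conv_lhs => rw [hsplitL]
  conv_rhs => rw [hsplitR]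
  rw [List.map_append, List.sum_append, List.map_append, List.sum_append,
      List.map_map, List.map_map]
  have h1 : ((List.range (A.length - k)).map (fun i =>
      if (A ++ A).getD (k + i) 0 ≤ (i : Int) then (1 : Int) else 0)).sum
      = ((List.range (A.length - k)).map ((fun j =>
          if A.getD j 0 ≤ (if k ≤ j then ((j : Int) - k) else ((j : Int) + A.length - k)) then (1 : Int) else 0) ∘ (fun u => k + u))).sum := by
    apply congrArg List.sum
    apply List.map_congr_left
    intro u hu
    rw [List.mem_range] at hu
    simp only [Function.comp]
    rw [hgl (k + u) (by omega), if_pos (by omega : k ≤ k + u)]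
    rw [show ((k + u : Nat) : Int) - (k : Int) = (u : Int) from by push_cast; ring]
  have h2 : ((List.range k).map ((fun i =>
      if (A ++ A).getD (k + i) 0 ≤ (i : Int) then (1 : Int) else 0) ∘ (fun t => (A.length - k) + t))).sum
      = ((List.range k).map (fun j =>
          if A.getD j 0 ≤ (if k ≤ j then ((j : Int) - k) else ((j : Int) + A.length - k)) then (1 : Int) else 0)).sum := by
    apply congrArg List.sum
    apply List.map_congr_left
    intro t ht
    rw [List.mem_range] at ht
    simp only [Function.comp]
    rw [hgr (k + (A.length - k + t)) (by omega) (by omega),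
        show k + (A.length - k + t) - A.length = t from by omega,
        if_neg (by omega : ¬ k ≤ t)]
    rw [show ((A.length - k + t : Nat) : Int) = (t : Int) + A.length - k from by
      push_cast [Nat.cast_sub hk.le]; ring]
  rw [h1, h2]
  ring

lemma pvInner_eq (A : List Int) (k : Int) (h0 : 0 ≤ k) (hk : k < (A.length : Int)) :
    (PySem.List.pyRange 0 (A.length : Int) 1).foldl
      (fun (p : Int) i => if PySem.List.pyGetD (PySem.List.pyRepeat A 2) (k + i) 0 ≤ i then p + 1 else p) 0
    = pvVal A k.toNat := by
  rw [PySem.List.foldl_ite_add_one, zero_add]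
  rw [← PySem.List.sum_map_ite_one_zero]
  rw [PySem.List.pyRange_one, List.map_map]
  rw [← pvA_count A k.toNat (by omega)]
  apply congrArg List.sum
  simp only [Int.sub_zero, Int.toNat_natCast]
  apply List.map_congr_left
  intro i hi
  rw [List.mem_range] at hi
  simp only [Function.comp, zero_add]
  rw [pvRepeat_two]
  rw [show k + (i : Int) = (((k.toNat + i : Nat) : Int)) from by push_cast [Int.toNat_of_nonneg h0]; ring,
      PySem.List.pyGetD_natCast]
  simp

lemma pvSel_aux (diff : List Int) (G : Int → Int) (L : Nat)
    (hG : ∀ (t : Nat), t < L → pvPref diff (t+1) = G (t : Int)) :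
    ∀ (n a : Nat), L = a + n → ∀ (bk bp : Int),
    ((PySem.List.pyRange (a : Int) (L : Int) 1).foldl
        (fun (s : Int × Int × Int) k =>
          if s.2.2 + PySem.List.pyGetD diff k 0 > s.2.1 then
            (k, s.2.2 + PySem.List.pyGetD diff k 0, s.2.2 + PySem.List.pyGetD diff k 0)
          else (s.1, s.2.1, s.2.2 + PySem.List.pyGetD diff k 0))
        (bk, bp, pvPref diff a)).1
    = ((PySem.List.pyRange (a : Int) (L : Int) 1).foldl
        (fun (s : Int × Int) k => if G k > s.1 then (G k, k) else s) (bp, bk)).2 := by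
  intro n
  induction n with
  | zero =>
      intro a ha bk bp
      rw [PySem.List.pyRange_one_eq_nil (show (L : Int) ≤ (a : Int) from by exact_mod_cast (by omega : L ≤ a))]
      rfl
  | succ m ih =>
      intro a ha bk bp
      rw [PySem.List.pyRange_one_cons (show (a : Int) < (L : Int) from by exact_mod_cast (by omega : a < L))]
      rw [List.foldl_cons, List.foldl_cons]
      dsimp only
      rw [PySem.List.pyGetD_natCast]
      have e1 : pvPref diff a + diff.getD a 0 = G (a : Int) := by
        rw [show pvPref diff a + diff.getD a 0 = pvPref diff (a+1) from rfl]
        exact hG a (by omega)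
      rw [e1]
      have hca : ((a + 1 : Nat) : Int) = (a : Int) + 1 := by push_cast; ring
      by_cases hgt : G (a : Int) > bp
      · rw [if_pos hgt, if_pos hgt]
        have := ih (a + 1) (by omega) ((a : Int)) (G (a : Int))
        rw [hG a (by omega), hca] at this
        exact this
      · rw [if_neg hgt, if_neg hgt]
        have := ih (a + 1) (by omega) bk bp
        rw [hG a (by omega), hca] at this
        exact this

-- ===== VERDICT (by name: the statement is the Claim_ definition above) =====
theorem bestRotation2_spec : Claim_equal_bestRotation2 := by
  intro A _hdom
  unfold Spec_bestRotation2
  by_cases hL : A.length = 0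
  · unfold bestRotation2 bestRotation2_alt
    dsimp only
    rw [hL]
    rw [if_pos rfl]
    simp only [Nat.cast_zero]
    rw [PySem.List.pyRange_one_eq_nil (le_refl (0 : Int))]
    rfl
  · unfold bestRotation2 bestRotation2_alt
    rw [if_neg hL]
    dsimp only
    refine Eq.trans (congrArg Prod.snd (PySem.List.foldl_congr_mem _ _
      (fun (s : Int × Int) k => if pvVal A k.toNat > s.1 then (pvVal A k.toNat, k) else s)
      (0, 0) ?h1)) ?h2
    case h1 =>
      intro acc x hx
      rw [PySem.List.mem_pyRange_one] at hx
      dsimp only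
      rw [pvInner_eq A x hx.1 hx.2]
    case h2 =>
      have hsel := pvSel_aux
        ((PySem.List.enumerate A).foldl (pvStepB A.length) (List.replicate (A.length + 1) 0))
        (fun k => pvVal A k.toNat) A.length
        (fun t ht => by simpa using pvPref_final A t ht)
        A.length 0 (by omega) 0 0
      simp only [Nat.cast_zero] at hsel
      rw [show pvPref ((PySem.List.enumerate A).foldl (pvStepB A.length) (List.replicate (A.length + 1) 0)) 0 = 0 from rfl] at hsel
      exact hsel.symm
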